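-- pv_equiv track=rewrite | github.com/asorial/Hiding-data-inside-images-using-orthogonal-moments | src/helpers/utils.py | methods_name_sba
-- ===== SOURCE A (Python) =====
-- def methods_name_sba(L):
--     k = -1
--     List_cad_res = []
--     List_cad = ["K", "T", "H", "C", "M", "qK", "qH", "qC", "qM", "DCT"]
--     for i in range(10):
--         for j in range(10):
--             k += 1
--             if k in L:
--                 if i != j:
--                     List_cad_res.append(List_cad[i] + List_cad[j])
--                 else:
--                     List_cad_res.append(List_cad[i])
--     return List_cad_res
-- ===== SOURCE B (Python) =====
-- def methods_name_sba(L):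
--     codes = ["K", "T", "H", "C", "M", "qK", "qH", "qC", "qM", "DCT"]
--     return [codes[k // 10] + (codes[k % 10] if k // 10 != k % 10 else "")
--             for k in sorted(set(k for k in L if 0 <= k < 100))]
-- ===== Notes on version B (the rewrite author's own statement) =====
-- stated objective: alternative
-- what changed: Instead of scanning all 100 (i,j) cells with a running counter and testing membership in L for each, B collects the distinct in-range members of L, sorts them, and maps each k directly to its code via k//10 and k%10; cost is O(|L| log |L| + |L|^2 for dedup) instead of a fixed 100*|L| scan.
import Mathlib
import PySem

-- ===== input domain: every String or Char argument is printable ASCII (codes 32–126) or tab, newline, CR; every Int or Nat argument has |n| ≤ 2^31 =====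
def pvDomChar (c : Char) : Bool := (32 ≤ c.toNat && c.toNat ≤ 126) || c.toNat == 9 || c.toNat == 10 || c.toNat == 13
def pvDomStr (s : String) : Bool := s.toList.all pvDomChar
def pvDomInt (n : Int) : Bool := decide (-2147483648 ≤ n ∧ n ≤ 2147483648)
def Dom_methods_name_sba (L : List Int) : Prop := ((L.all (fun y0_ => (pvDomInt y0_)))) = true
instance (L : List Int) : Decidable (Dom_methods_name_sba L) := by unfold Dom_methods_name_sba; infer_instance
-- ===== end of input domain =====

-- B builds the output from L itself (dedup + sort the in-range members of L, then map each to its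
-- code via k//10, k%10) instead of A's 10x10 counter scan over all cells: alternative decomposition.

-- ===== PORT A =====
def methods_name_sba (L : List Int) : List String :=
  let List_cad : List String := ["K", "T", "H", "C", "M", "qK", "qH", "qC", "qM", "DCT"]
  let r := (List.range 10).foldl (fun (s : Int × List String) i =>
    (List.range 10).foldl (fun (s : Int × List String) j =>
      let k := s.1 + 1
      let acc :=
        if k ∈ L then
          if i ≠ j then s.2 ++ [List_cad.getD i "" ++ List_cad.getD j ""]
          else s.2 ++ [List_cad.getD i ""]
        else s.2
      (k, acc)) s) ((-1 : Int), ([] : List String))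
  r.2

-- ===== PORT B =====
def methods_name_sba_alt (L : List Int) : List String :=
  let codes : List String := ["K", "T", "H", "C", "M", "qK", "qH", "qC", "qM", "DCT"]
  (PySem.List.sorted (PySem.Set.ofList (L.filter (fun k => decide (0 ≤ k ∧ k < 100)))) (fun x => x) false).map
    (fun k =>
      PySem.List.pyGetD codes (PySem.Int.floordiv k 10) "" ++
        (if PySem.Int.floordiv k 10 ≠ PySem.Int.mod k 10 then PySem.List.pyGetD codes (PySem.Int.mod k 10) "" else ""))

-- ===== PRECONDITION & SPEC =====
def Spec_methods_name_sba (L : List Int) (out : List String) : Prop := out = methods_name_sba_alt L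
instance (L : List Int) (out : List String) : Decidable (Spec_methods_name_sba L out) := by unfold Spec_methods_name_sba; infer_instance

-- ===== CLAIM (what is proved, stated in full; the proofs are below) =====
def Claim_equal_methods_name_sba : Prop := ∀ (L : List Int), Dom_methods_name_sba L → Spec_methods_name_sba L (methods_name_sba L)

-- ===== LEMMAS AND PROOFS =====

def mCad : List String := ["K", "T", "H", "C", "M", "qK", "qH", "qC", "qM", "DCT"]

-- B's per-element code function (the lambda of port B).
def mCode : Int → String := fun k =>
  PySem.List.pyGetD mCad (PySem.Int.floordiv k 10) "" ++
    (if PySem.Int.floordiv k 10 ≠ PySem.Int.mod k 10 then PySem.List.pyGetD mCad (PySem.Int.mod k 10) "" else "")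

-- The increasing list of candidates 0..99 actually present in L.
def mKeys (L : List Int) : List Int :=
  (PySem.List.pyRange 0 100 1).filter (fun k => decide (k ∈ L))

-- A's inner-loop body, with i the outer index and j the inner one.
def mStep (L : List Int) (i : Nat) (s : Int × List String) (j : Nat) : Int × List String :=
  let k := s.1 + 1
  let acc :=
    if k ∈ L then
      if i ≠ j then s.2 ++ [mCad.getD i "" ++ mCad.getD j ""]
      else s.2 ++ [mCad.getD i ""]
    else s.2
  (k, acc)

lemma mCode_block (i j : Nat) (hj : j < 10) :
    mCode ((i : Int) * 10 + j) =
      if i ≠ j then mCad.getD i "" ++ mCad.getD j "" else mCad.getD i "" := by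
  have h10 : (0 : Int) < 10 := by norm_num
  have hd : PySem.Int.floordiv ((i : Int) * 10 + j) 10 = (i : Int) := by
    rw [PySem.Int.floordiv_eq_ediv_of_pos h10]; omega
  have hm : PySem.Int.mod ((i : Int) * 10 + j) 10 = (j : Int) := by
    rw [PySem.Int.mod_eq_emod_of_pos h10]; omega
  simp only [mCode, hd, hm, PySem.List.pyGetD_natCast, ne_eq, Int.natCast_inj]
  by_cases h : i = j <;> simp [h]

lemma inner_loop (L : List Int) (i : Nat) (n : Nat) (acc : List String) :
    (List.range n).foldl (mStep L i) ((i : Int) * 10 - 1, acc) =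
      ((i : Int) * 10 - 1 + n,
       acc ++ ((List.range n).filter (fun j : Nat => decide ((i : Int) * 10 + (j : Int) ∈ L))).map
          (fun j : Nat => if i ≠ j then mCad.getD i "" ++ mCad.getD j "" else mCad.getD i "")) := by
  induction n with
  | zero => simp
  | succ n ih =>
    rw [List.range_succ, List.foldl_append, ih]
    have hk : (i : Int) * 10 - 1 + n + 1 = (i : Int) * 10 + n := by ring
    simp only [List.foldl_cons, List.foldl_nil, mStep, hk, List.filter_append,
      List.map_append, List.filter_cons, List.filter_nil]
    by_cases h : ((i : Int) * 10 + (n : Int)) ∈ L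
    · refine Prod.ext (by push_cast; ring) ?_
      by_cases h2 : i = n
      · subst h2; simp [h, List.append_assoc]
      · simp [h, h2, List.append_assoc]
    · refine Prod.ext (by push_cast; ring) ?_
      simp [h]

lemma block_eq (L : List Int) (i : Nat) :
    ((List.range 10).filter (fun j : Nat => decide ((i : Int) * 10 + (j : Int) ∈ L))).map
        (fun j : Nat => if i ≠ j then mCad.getD i "" ++ mCad.getD j "" else mCad.getD i "")
      = ((PySem.List.pyRange ((i : Int) * 10) ((i : Int) * 10 + 10) 1).filter
          (fun k => decide (k ∈ L))).map mCode := by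
  have hr : PySem.List.pyRange ((i : Int) * 10) ((i : Int) * 10 + 10) 1
      = (List.range 10).map (fun j : Nat => (i : Int) * 10 + (j : Int)) := by
    rw [PySem.List.pyRange_one]
    have h1 : ((i : Int) * 10 + 10 - (i : Int) * 10) = 10 := by ring
    rw [h1]
    rfl
  rw [hr, List.filter_map, List.map_map]
  apply List.map_congr_left
  intro j hj
  have hj10 : j < 10 := List.mem_range.mp (List.mem_filter.mp hj).1
  exact (mCode_block i j hj10).symm

lemma outer_loop (L : List Int) (m : Nat) (hm : m ≤ 10) :
    (List.range m).foldl (fun s i => (List.range 10).foldl (mStep L i) s) ((-1 : Int), ([] : List String)) =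
      ((m : Int) * 10 - 1,
       ((PySem.List.pyRange 0 ((m : Int) * 10) 1).filter (fun k => decide (k ∈ L))).map mCode) := by
  induction m with
  | zero => norm_num [PySem.List.pyRange_one_eq_nil]
  | succ m ih =>
    have ih' := ih (Nat.le_of_succ_le hm)
    rw [show List.range (m + 1) = List.range m ++ [m] from List.range_succ, List.foldl_append, ih']
    simp only [List.foldl_cons, List.foldl_nil]
    rw [inner_loop L m 10, block_eq L m]
    have hsplit : PySem.List.pyRange 0 (((m + 1 : Nat) : Int) * 10) 1
        = PySem.List.pyRange 0 ((m : Int) * 10) 1 ++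
          PySem.List.pyRange ((m : Int) * 10) ((m : Int) * 10 + 10) 1 := by
      have heq : (((m + 1 : Nat) : Int) * 10) = (m : Int) * 10 + 10 := by push_cast; ring
      rw [heq, PySem.List.pyRange_one_append 0 ((m : Int) * 10) ((m : Int) * 10 + 10)
        (by positivity) (by omega)]
    rw [hsplit, List.filter_append, List.map_append]
    refine Prod.ext ?_ ?_
    · push_cast; ring
    · rfl

lemma a_eq_map (L : List Int) : methods_name_sba L = (mKeys L).map mCode := by
  have h : methods_name_sba L =
      ((List.range 10).foldl (fun s i => (List.range 10).foldl (mStep L i) s)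
        ((-1 : Int), ([] : List String))).2 := rfl
  rw [h, outer_loop L 10 (by norm_num)]
  norm_num [mKeys]

lemma sorted_eq_mKeys (L : List Int) :
    PySem.List.sorted (PySem.Set.ofList (L.filter (fun k => decide (0 ≤ k ∧ k < 100)))) (fun x => x) false = mKeys L := by
  refine PySem.List.sorted_eq_of_perm_of_pairwise_lt _ _ _ ?_ ?_
  · unfold mKeys
    rw [List.perm_ext_iff_of_nodup (List.Nodup.filter _ (PySem.List.nodup_pyRange_one 0 100)) (PySem.Set.nodup_ofList _)]
    intro a
    simp [PySem.Set.mem_ofList, List.mem_filter, PySem.List.mem_pyRange_one, and_comm]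
  · exact List.Pairwise.filter _ (PySem.List.pairwise_lt_pyRange_one 0 100)

theorem methods_name_sba_eq (L : List Int) : methods_name_sba L = methods_name_sba_alt L := by
  rw [a_eq_map]
  show (mKeys L).map mCode = methods_name_sba_alt L
  unfold methods_name_sba_alt
  rw [sorted_eq_mKeys]
  rfl

-- ===== VERDICT (by name: the statement is the Claim_ definition above) =====
theorem methods_name_sba_spec : Claim_equal_methods_name_sba := by
  intro L _
  exact methods_name_sba_eq L
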